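-- pv_equiv track=rewrite | github.com/Frankieli123/ExaFree | core/proxy_utils.py | no_proxy_matches
-- ===== SOURCE A (Python) =====
-- def no_proxy_matches(host: str, no_proxy: str) -> bool:
--     """
--     检查主机是否在 NO_PROXY 豁免列表中
--
--     Args:
--         host: 要检查的主机名，如 "mail.chatgpt.org.uk"
--         no_proxy: NO_PROXY 列表字符串，如 "localhost,127.0.0.1,.local"
--
--     Returns:
--         bool: 如果主机在豁免列表中返回 True，否则返回 False
--
--     匹配规则:
--         - 精确匹配: "localhost" 匹配 "localhost"
--         - 域名后缀匹配: ".local" 匹配 "foo.local", "bar.foo.local"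
--         - IP 地址匹配: "127.0.0.1" 精确匹配
--     """
--     if not host or not no_proxy:
--         return False
--
--     host = host.lower().strip()
--     if not host:
--         return False
--
--     # 解析 no_proxy 列表
--     no_proxy_list = [item.strip().lower() for item in no_proxy.split(",") if item.strip()]
--
--     for pattern in no_proxy_list:
--         if not pattern:
--             continue
--
--         # 精确匹配
--         if host == pattern:
--             return True
--
--         # 域名后缀匹配 (如 .local 匹配 foo.local)
--         if pattern.startswith("."):
--             if host.endswith(pattern) or host == pattern[1:]:
--                 return True
--         else:
--             # 也支持不带点的后缀匹配 (如 local 匹配 foo.local)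
--             if host.endswith("." + pattern):
--                 return True
--
--     return False
-- ===== SOURCE B (Python) =====
-- def no_proxy_matches(host: str, no_proxy: str) -> bool:
--     # Build the set of pattern strings that would exempt this host, then test membership.
--     if not host or not no_proxy:
--         return False
--     host = host.lower().strip()
--     if not host:
--         return False
--     cand = {host, "." + host}
--     for j, ch in enumerate(host):
--         if ch == ".":
--             cand.add(host[j:])
--             cand.add(host[j + 1:])
--     return any(p in cand for p in (item.strip().lower() for item in no_proxy.split(",")) if p)
-- ===== Notes on version B (the rewrite author's own statement) =====
-- stated objective: alternative
-- what changed: A tests each NO_PROXY pattern with per-pattern prefix/suffix branching; B instead builds once the set of all strings that could exempt the host (the host, '.'+host, and every dot-suffix with and without its leading dot) and answers by set membership over the parsed pattern list.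
import Mathlib
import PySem

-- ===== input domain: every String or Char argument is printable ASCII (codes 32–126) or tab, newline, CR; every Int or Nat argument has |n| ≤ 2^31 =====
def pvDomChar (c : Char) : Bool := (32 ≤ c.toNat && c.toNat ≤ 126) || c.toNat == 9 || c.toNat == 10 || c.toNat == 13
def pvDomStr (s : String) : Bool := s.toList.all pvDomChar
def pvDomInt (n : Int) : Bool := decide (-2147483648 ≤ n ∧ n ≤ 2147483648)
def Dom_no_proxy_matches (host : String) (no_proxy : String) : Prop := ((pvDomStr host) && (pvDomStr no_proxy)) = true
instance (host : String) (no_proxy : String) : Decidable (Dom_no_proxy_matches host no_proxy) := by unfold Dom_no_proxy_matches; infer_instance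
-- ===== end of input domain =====

-- B replaces A's per-pattern prefix/suffix branching by a host-derived candidate set tested by membership (objective: alternative).

-- ===== PORT A =====
-- the per-pattern matching test of A's loop body (exact match / leading-dot suffix / dotless suffix)
def pvCondA (h p : List Char) : Bool :=
  if p = [] then false                              -- "if not pattern: continue"
  else if h = p then true                           -- exact match
  else if PySem.Chars.startswith p ['.'] then       -- pattern.startswith(".")
    (PySem.Chars.endswith h p || decide (h = PySem.List.slice p (some 1) none))
  else PySem.Chars.endswith h ('.' :: p)            -- host.endswith("." + pattern)

def no_proxy_matches (host : String) (no_proxy : String) : Bool :=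
  if host.toList = [] ∨ no_proxy.toList = [] then false
  else if PySem.Chars.strip (PySem.Chars.lower host.toList) = [] then false
  else
    ((PySem.Chars.splitOn no_proxy.toList [',']).filterMap
      (fun it => if PySem.Chars.strip it = [] then none
                 else some (PySem.Chars.lower (PySem.Chars.strip it)))).any
      (fun p => pvCondA (PySem.Chars.strip (PySem.Chars.lower host.toList)) p)

-- ===== PORT B =====
-- B's loop body: when host[j] == '.', add host[j:] and host[j+1:] to the candidate set
def pvCandStep (h : List Char) (c : PySem.Set (List Char)) (jc : Int × Char) : PySem.Set (List Char) :=
  if jc.2 = '.' then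
    PySem.Set.add (PySem.Set.add c (PySem.List.slice h (some jc.1) none))
      (PySem.List.slice h (some (jc.1 + 1)) none)
  else c

-- cand = {host, "." + host} plus the dot-suffixes collected by the enumerate loop
def pvCand (h : List Char) : PySem.Set (List Char) :=
  (PySem.List.enumerate h).foldl (pvCandStep h) (PySem.Set.ofList [h, '.' :: h])

def no_proxy_matches_alt (host : String) (no_proxy : String) : Bool :=
  if host.toList = [] ∨ no_proxy.toList = [] then false
  else if PySem.Chars.strip (PySem.Chars.lower host.toList) = [] then false
  else
    ((PySem.Chars.splitOn no_proxy.toList [',']).map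
      (fun it => PySem.Chars.lower (PySem.Chars.strip it))).any
      (fun p => decide (p ≠ []) && PySem.Set.contains (pvCand (PySem.Chars.strip (PySem.Chars.lower host.toList))) p)

-- ===== PRECONDITION & SPEC =====
def Spec_no_proxy_matches (host : String) (no_proxy : String) (out : Bool) : Prop := out = no_proxy_matches_alt host no_proxy
instance (host : String) (no_proxy : String) (out : Bool) : Decidable (Spec_no_proxy_matches host no_proxy out) := by unfold Spec_no_proxy_matches; infer_instance

-- ===== CLAIM (what is proved, stated in full; the proofs are below) =====
def Claim_equal_no_proxy_matches : Prop := ∀ (host : String) (no_proxy : String), Dom_no_proxy_matches host no_proxy → Spec_no_proxy_matches host no_proxy (no_proxy_matches host no_proxy)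

-- ===== LEMMAS AND PROOFS =====

-- host[n:] for a nonnegative index is List.drop
lemma pv_sliceFrom (l : List Char) (n : Nat) :
    PySem.List.slice l (some (n : Int)) none = l.drop n := by
  rw [PySem.List.slice_some_none]
  unfold PySem.List.clampIdx
  rw [if_neg (by omega : ¬ ((n : Int) < 0))]
  simp only [Int.toNat_natCast]
  rcases Nat.le_total n l.length with hle | hle
  · rw [min_eq_left hle]
  · rw [min_eq_right hle, List.drop_length, List.drop_eq_nil_of_le hle]

lemma pv_candStep_eval (h : List Char) (c : PySem.Set (List Char)) (s : Nat) (a : Char) :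
    pvCandStep h c (((s : Nat) : Int), a) =
      if a = '.' then
        PySem.Set.add (PySem.Set.add c (h.drop s)) (h.drop (s + 1))
      else c := by
  unfold pvCandStep
  have h1 : ((s : Nat) : Int) + 1 = (((s + 1 : Nat) : Nat) : Int) := by push_cast; ring
  simp only [h1, pv_sliceFrom]

-- membership in the fold that builds the candidate set
lemma pv_mem_candFold (h : List Char) (t : List Char) :
    ∀ (s : Nat) (c : PySem.Set (List Char)) (x : List Char),
    (x ∈ (PySem.List.enumerate t ((s : Nat) : Int)).foldl (pvCandStep h) c) ↔
      x ∈ c ∨ ∃ k, ∃ hk : k < t.length,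
        (t[k]'hk = '.' ∧ (x = h.drop (s + k) ∨ x = h.drop (s + k + 1))) := by
  induction t with
  | nil =>
    intro s c x
    simp [PySem.List.enumerate]
  | cons a t ih =>
    intro s c x
    rw [PySem.List.enumerate_cons, List.foldl_cons]
    have hcast : ((s : Nat) : Int) + 1 = (((s + 1 : Nat) : Nat) : Int) := by push_cast; ring
    rw [hcast, ih, pv_candStep_eval]
    constructor
    · rintro (hmem | ⟨k, hk, hdot, hx⟩)
      · by_cases ha : a = '.'
        · rw [if_pos ha] at hmem
          rw [PySem.Set.mem_add, PySem.Set.mem_add] at hmem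
          rcases hmem with (hmem | hx) | hx
          · exact Or.inl hmem
          · exact Or.inr ⟨0, by simp, by simpa using ha, Or.inl (by simpa using hx)⟩
          · exact Or.inr ⟨0, by simp, by simpa using ha, Or.inr (by simpa using hx)⟩
        · rw [if_neg ha] at hmem
          exact Or.inl hmem
      · have hx' : x = List.drop (s + (k + 1)) h ∨ x = List.drop (s + (k + 1) + 1) h := by
          rw [show s + (k + 1) = s + 1 + k by omega]
          exact hx
        exact Or.inr ⟨k + 1, by simpa using Nat.succ_lt_succ hk, by simpa using hdot, hx'⟩
    · rintro (hmem | ⟨k, hk, hdot, hx⟩)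
      · left
        by_cases ha : a = '.'
        · rw [if_pos ha, PySem.Set.mem_add, PySem.Set.mem_add]
          exact Or.inl (Or.inl hmem)
        · rw [if_neg ha]; exact hmem
      · cases k with
        | zero =>
          left
          have ha : a = '.' := by simpa using hdot
          rw [if_pos ha, PySem.Set.mem_add, PySem.Set.mem_add]
          rcases hx with hx | hx
          · exact Or.inl (Or.inr (by simpa using hx))
          · exact Or.inr (by simpa using hx)
        | succ k =>
          have hx' : x = List.drop (s + 1 + k) h ∨ x = List.drop (s + 1 + k + 1) h := by
            rw [show s + 1 + k = s + (k + 1) by omega]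
            exact hx
          exact Or.inr ⟨k, by simpa using Nat.lt_of_succ_lt_succ hk, by simpa using hdot, hx'⟩

-- characterisation of the candidate set
lemma pv_mem_cand_iff (h p : List Char) :
    p ∈ pvCand h ↔
      (p = h ∨ p = '.' :: h ∨ ∃ k, ∃ hk : k < h.length,
        (h[k]'hk = '.' ∧ (p = h.drop k ∨ p = h.drop (k + 1)))) := by
  unfold pvCand
  have h0 : PySem.List.enumerate h 0 = PySem.List.enumerate h (((0 : Nat) : Nat) : Int) := by norm_num
  rw [h0, pv_mem_candFold]
  simp only [PySem.Set.mem_ofList, List.mem_cons, List.not_mem_nil, or_false,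
    Nat.zero_add, or_assoc]

-- A's per-pattern test, as a proposition
lemma pv_condA_true_iff (h p : List Char) (hp : p ≠ []) :
    pvCondA h p = true ↔
      (h = p ∨ (['.'] <+: p ∧ (p <:+ h ∨ h = p.drop 1)) ∨ (¬ ['.'] <+: p ∧ ('.' :: p) <:+ h)) := by
  unfold pvCondA
  rw [if_neg hp]
  have hslice : PySem.List.slice p (some 1) none = p.drop 1 := by
    simpa using pv_sliceFrom p 1
  split_ifs with h1 h2
  · simp [h1]
  · have hs2 : ['.'] <+: p := (PySem.Chars.startswith_iff p ['.']).mp h2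
    rw [Bool.or_eq_true, PySem.Chars.endswith_iff, decide_eq_true_eq, hslice]
    constructor
    · intro hc; exact Or.inr (Or.inl ⟨hs2, hc⟩)
    · rintro (h' | ⟨_, hc⟩ | ⟨hn, _⟩)
      · exact absurd h' h1
      · exact hc
      · exact absurd hs2 hn
  · have hs2 : ¬ ['.'] <+: p := fun hc => h2 ((PySem.Chars.startswith_iff p ['.']).mpr hc)
    rw [PySem.Chars.endswith_iff]
    constructor
    · intro hc; exact Or.inr (Or.inr ⟨hs2, hc⟩)
    · rintro (h' | ⟨hn, _⟩ | ⟨_, hc⟩)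
      · exact absurd h' h1
      · exact absurd hn hs2
      · exact hc

-- the heart: A's branching test ↔ membership in B's candidate set (nonempty host and pattern)
lemma pv_cond_iff_mem (h p : List Char) (hp : p ≠ []) :
    pvCondA h p = true ↔ p ∈ pvCand h := by
  rw [pv_condA_true_iff h p hp, pv_mem_cand_iff]
  constructor
  · rintro (rfl | ⟨hpre, hsuf | heq⟩ | ⟨_, hsuf⟩)
    · exact Or.inl rfl
    · -- p starts with '.', p is a suffix of h
      obtain ⟨u, hu⟩ := hsuf
      obtain ⟨c, q, rfl⟩ : ∃ c q, p = c :: q := by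
        cases p with
        | nil => exact absurd rfl hp
        | cons c q => exact ⟨c, q, rfl⟩
      have hc : c = '.' := by
        rcases List.cons_prefix_cons.mp hpre with ⟨hc, _⟩
        exact hc.symm
      have hk : u.length < h.length := by
        have := congrArg List.length hu
        simp at this; omega
      have hdrop : h.drop u.length = c :: q := by
        rw [← hu, List.drop_left]
      have hget : h[u.length]'hk = '.' := by
        have := List.drop_eq_getElem_cons hk
        rw [hdrop] at this
        rw [← hc]
        exact (List.cons.injEq _ _ _ _).mp this.symm |>.1
      exact Or.inr (Or.inr ⟨u.length, hk, hget, Or.inl hdrop.symm⟩)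
    · -- p starts with '.', h = p[1:]
      obtain ⟨c, q, rfl⟩ : ∃ c q, p = c :: q := by
        cases p with
        | nil => exact absurd rfl hp
        | cons c q => exact ⟨c, q, rfl⟩
      have hc : c = '.' := by
        rcases List.cons_prefix_cons.mp hpre with ⟨hc, _⟩
        exact hc.symm
      simp only [List.drop_one, List.tail_cons] at heq
      exact Or.inr (Or.inl (by rw [hc, heq]))
    · -- '.' + p is a suffix of h
      obtain ⟨u, hu⟩ := hsuf
      have hk : u.length < h.length := by
        have := congrArg List.length hu
        simp at this; omega
      have hdrop : h.drop u.length = '.' :: p := by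
        rw [← hu, List.drop_left]
      have hcons := List.drop_eq_getElem_cons hk
      rw [hdrop] at hcons
      have hget : h[u.length]'hk = '.' := ((List.cons.injEq _ _ _ _).mp hcons.symm).1
      have htail : h.drop (u.length + 1) = p := ((List.cons.injEq _ _ _ _).mp hcons.symm).2
      exact Or.inr (Or.inr ⟨u.length, hk, hget, Or.inr htail.symm⟩)
  · rintro (rfl | rfl | ⟨k, hk, hdot, rfl | rfl⟩)
    · exact Or.inl rfl
    · exact Or.inr (Or.inl ⟨⟨h, rfl⟩, Or.inr rfl⟩)
    · -- p = h.drop k with h[k] = '.'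
      have hcons := List.drop_eq_getElem_cons hk
      rw [hdot] at hcons
      exact Or.inr (Or.inl ⟨by rw [hcons]; exact ⟨_, rfl⟩, Or.inl (List.drop_suffix k h)⟩)
    · -- p = h.drop (k+1) with h[k] = '.'
      have hcons := List.drop_eq_getElem_cons hk
      rw [hdot] at hcons
      by_cases hpre : ['.'] <+: h.drop (k + 1)
      · exact Or.inr (Or.inl ⟨hpre, Or.inl (List.drop_suffix (k + 1) h)⟩)
      · refine Or.inr (Or.inr ⟨hpre, ?_⟩)
        rw [← hcons]
        exact List.drop_suffix k h
  
-- pointwise Bool form (covers the empty pattern as well)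
lemma pv_condA_eq (h p : List Char) :
    pvCondA h p = (decide (p ≠ []) && PySem.Set.contains (pvCand h) p) := by
  by_cases hp : p = []
  · subst hp; simp [pvCondA]
  · have hd : decide (p ≠ []) = true := by simp [hp]
    rw [hd, Bool.true_and, Bool.eq_iff_iff, PySem.Set.contains_iff]
    exact pv_cond_iff_mem h p hp

-- A's filtered any-loop equals B's membership any over the mapped list
lemma pv_any_eq (h : List Char) (l : List (List Char)) :
    (l.filterMap
        (fun it => if PySem.Chars.strip it = [] then none
                   else some (PySem.Chars.lower (PySem.Chars.strip it)))).any
      (fun p => pvCondA h p)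
    = (l.map (fun it => PySem.Chars.lower (PySem.Chars.strip it))).any
        (fun p => decide (p ≠ []) && PySem.Set.contains (pvCand h) p) := by
  induction l with
  | nil => rfl
  | cons it l ih =>
    rw [List.map_cons, List.any_cons, ← pv_condA_eq]
    by_cases hs : PySem.Chars.strip it = []
    · simp only [List.filterMap_cons, if_pos hs]
      rw [ih]
      have : pvCondA h (PySem.Chars.lower (PySem.Chars.strip it)) = false := by
        rw [hs]
        rfl
      rw [this, Bool.false_or]
    · simp only [List.filterMap_cons, if_neg hs, List.any_cons]
      rw [ih]

-- ===== VERDICT (by name: the statement is the Claim_ definition above) =====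
theorem no_proxy_matches_spec : Claim_equal_no_proxy_matches := by
  intro host no_proxy _
  unfold Spec_no_proxy_matches no_proxy_matches no_proxy_matches_alt
  split_ifs with h1 h2
  · rfl
  · rfl
  · exact pv_any_eq _ _
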